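-- pv_equiv track=rewrite | github.com/is2js/2022_algorithm | programmers/17_stack_스킬트리_직전과의비교가_바로다음것이어야하고_첨부터고정된게들어가야해서_stack과는안어울림/17_stack_스킬트리_직전과의비교가_바로다음것이어야하고_첨부터고정된게들어가야해서_stack과는안어울림.py | check_skill
-- ===== SOURCE A (Python) =====
-- def check_skill(skill, skill_tree):
--     stack = []
--
--     ## (1) [직전or직전부터역순 node들]에 대해 확인 주체 or 대상에 해당하는 원소들만 배열에 돌린다.
--     for x in [x for x in skill_tree if x in skill]:
--         # (2) 만약, 확인대상에는 해당안하고, 확인주체로서 stack에 바로 들어간다면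
--         # if x in [확인주체들]: stack.append(x) continue 로 조건없이 먼저 stack에 바로 올려준다.
--
--         # (4) stack에 1개라도 찬 순간(위 or 밑의 append) if stack/while stack으로 조건을 걸어서 현재원소를 peek과 비교해서 검사한다.
--         #   -> 모든 node가 검사대상이자 검사주체면, 검사성공시 -> append가 이루어져야한다.
--         # => 직전과의 비교만 필요하면, (4-1) if stack:
--         #    직전 및 역순으로 다 비교하면 (4-2) while stack and 언제까지역순검사할건지조건들: pop()으로 역순으로 직전것들을 모두 검사 준비한다.
--         if stack:
--             # (5) stack의 peek(직전)과 검사시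
--             #    if 성공시 -> 주체이자 대상이면, append
--             #    else(실패)시 -> return False or flag처리를 해준다.
--             if skill.index(x) == skill.index(stack[-1]) + 1:
--                 stack.append(x)
--             else:
--                 # 검사 실패시 -> return False  or  flag처리
--                 return False
--
--         # (6) 현재node가 올라갔으면, 배열의 다음 원소로 넘어가야한다.
--         #    넘어가기 전에 처리해야할게 있으면 처리해준다.
--         #   만약, while로 다 pop된다면, append가 되어야할 것 같고
--         #   추가조건이 남았으면 추가조건을 처리해줘야한다.
--
--
--         # (3) stack에 들어갈 대상들이라면 바깥배열의 첫원소부터 append해야한다.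
--         #    -> dfs라면 바깥에서 탐색배열 반복문없이, 첫원소를 미리 stack에 집어넣고, 확인하며 append한다
--         #    => 한번 append되고나서, 다음원소부터는 더 위쪽에서 if stack while stack에 의해 확인검사한다.
--         # stack.append(x)
--
--         # (3-2) 하지만 여기서는 정확하게 첫원소는 skill의 첫번재원소와 동일한 것만 들어가야한다.
--         #    => stack으로 안풀어도 되지만, 일단 억지로 푼다.
--         if not stack:
--             if x == skill[0]:
--                 stack.append(x)
--             # stack이 안찬 첫번째원소인데, skill첫번째 원소와 다르면, 실패다.
--             else:
--                 return False
--
--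
--     # (7) 배열을 다 탐색했는데, 확인검사에서 실패안했으면 성공이다.
--     else:
--         return True
-- ===== SOURCE B (Python) =====
-- def check_skill(skill, skill_tree):
--     learned = "".join(c for c in skill_tree if c in skill)
--     return len(set(learned)) == len(learned) and skill.startswith(learned)
-- ===== Notes on version B (the rewrite author's own statement) =====
-- stated objective: simpler
-- what changed: Replaces A's stateful stack walk with skill.index adjacency checks and early returns by a different characterisation computed with no index arithmetic at all: join the skills found in skill_tree into a string and require it to be duplicate-free (len(set)==len) and a prefix of skill (startswith).
import Mathlib
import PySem

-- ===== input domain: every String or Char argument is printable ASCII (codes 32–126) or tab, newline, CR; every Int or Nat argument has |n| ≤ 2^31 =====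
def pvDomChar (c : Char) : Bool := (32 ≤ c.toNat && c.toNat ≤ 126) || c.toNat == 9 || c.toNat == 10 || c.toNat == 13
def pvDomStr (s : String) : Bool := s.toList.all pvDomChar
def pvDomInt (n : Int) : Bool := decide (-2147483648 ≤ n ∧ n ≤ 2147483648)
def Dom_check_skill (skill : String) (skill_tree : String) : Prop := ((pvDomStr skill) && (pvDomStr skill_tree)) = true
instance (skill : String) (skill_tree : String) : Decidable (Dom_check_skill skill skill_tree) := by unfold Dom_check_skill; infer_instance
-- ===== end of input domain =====

-- B drops A's stack and all skill.index computations: it joins the learned skills into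
-- a string and tests "duplicate-free and a prefix of skill" via set() and startswith
-- (objective: simpler — a different characterisation of the same condition).

-- ===== PORT A =====
-- the for-loop over the filtered list; stack is kept head-first (head = Python's stack[-1])
def check_skill_loop (s : List Char) (stack : List Char) : List Char → Bool
  | [] => true
  | x :: xs =>
    match stack with
    | t :: rest =>
      -- if stack: compare skill.index(x) with skill.index(stack[-1]) + 1
      if PySem.Chars.find s [x] = PySem.Chars.find s [t] + 1 then
        check_skill_loop s (x :: t :: rest) xs
      else false
    | [] =>
      -- if not stack: x == skill[0]  (skill[0] via pyGet?, unreachable when skill = "")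
      if PySem.List.pyGet? s 0 = some x then check_skill_loop s [x] xs
      else false

def check_skill (skill : String) (skill_tree : String) : Bool :=
  check_skill_loop skill.toList []
    (skill_tree.toList.filter (fun x => PySem.Chars.isIn [x] skill.toList))

-- ===== PORT B =====
-- learned = "".join(c for c in skill_tree if c in skill);
-- return len(set(learned)) == len(learned) and skill.startswith(learned)
def check_skill_alt (skill : String) (skill_tree : String) : Bool :=
  let learned := skill_tree.toList.filter (fun c => PySem.Chars.isIn [c] skill.toList)
  (PySem.Set.len (PySem.Set.ofList learned) == (learned.length : Int)) &&
    PySem.Chars.startswith skill.toList learned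

-- ===== PRECONDITION & SPEC =====
def Spec_check_skill (skill : String) (skill_tree : String) (out : Bool) : Prop := out = check_skill_alt skill skill_tree
instance (skill : String) (skill_tree : String) (out : Bool) : Decidable (Spec_check_skill skill skill_tree out) := by unfold Spec_check_skill; infer_instance

-- ===== CLAIM (what is proved, stated in full; the proofs are below) =====
def Claim_equal_check_skill : Prop := ∀ (skill : String) (skill_tree : String), Dom_check_skill skill skill_tree → Spec_check_skill skill skill_tree (check_skill skill skill_tree)

-- ===== LEMMAS AND PROOFS =====

-- [c] is a prefix of t exactly when t starts with c
theorem prefix_single_iff (t : List Char) (c : Char) : [c] <+: t ↔ t[0]? = some c := by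
  cases t with
  | nil => simp
  | cons a as =>
    constructor
    · rintro ⟨u, hu⟩
      simp at hu
      simp [hu.1]
    · intro h
      simp at h
      exact ⟨as, by simp [h]⟩

-- skill.index(x) = i exactly when x first occurs at position i
theorem find_single_eq_natCast_iff (s : List Char) (c : Char) (i : Nat) :
    PySem.Chars.find s [c] = (i : Int) ↔
      (s[i]? = some c ∧ ∀ j < i, s[j]? ≠ some c) := by
  constructor
  · intro h
    have h0 : (0 : Int) ≤ PySem.Chars.find s [c] := by rw [h]; positivity
    have hspec := PySem.Chars.find_spec (s := s) (sub := [c]) h0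
    have htn : (PySem.Chars.find s [c]).toNat = i := by rw [h]; simp
    rw [htn] at hspec
    constructor
    · have := (prefix_single_iff _ c).mp hspec.1
      simpa [List.getElem?_drop] using this
    · intro j hj hcon
      exact hspec.2 j hj ((prefix_single_iff _ c).mpr (by simpa [List.getElem?_drop] using hcon))
  · rintro ⟨h1, h2⟩
    have hpre : [c] <+: s.drop i := (prefix_single_iff _ c).mpr (by simpa [List.getElem?_drop] using h1)
    have hin : PySem.Chars.isIn [c] s = true :=
      (PySem.Chars.exists_prefix_drop_iff_isIn _ _).mp ⟨i, hpre⟩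
    have h0 : (0 : Int) ≤ PySem.Chars.find s [c] :=
      (PySem.Chars.find_nonneg_iff _ _).mpr ((PySem.Chars.isIn_iff_infix _ _).mp hin)
    have hspec := PySem.Chars.find_spec (s := s) (sub := [c]) h0
    have hk : (PySem.Chars.find s [c]).toNat = i := by
      rcases lt_trichotomy (PySem.Chars.find s [c]).toNat i with h | h | h
      · exact absurd (by simpa [List.getElem?_drop] using (prefix_single_iff _ c).mp hspec.1)
          (h2 _ h)
      · exact h
      · exact absurd hpre (hspec.2 i h)
    omega

-- range(n) as pyRange
theorem pyRange_zero_natCast (n : Nat) :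
    PySem.List.pyRange 0 (n : Int) 1 = (List.range n).map (fun i => Int.ofNat i) := by
  induction n with
  | zero => simp [PySem.List.pyRange_one_eq_nil]
  | succ m ih =>
    have hsplit : PySem.List.pyRange 0 ((m + 1 : Nat) : Int) 1 =
        PySem.List.pyRange 0 (m : Int) 1 ++ PySem.List.pyRange (m : Int) ((m + 1 : Nat) : Int) 1 :=
      PySem.List.pyRange_one_append _ _ _ (by positivity) (by push_cast; omega)
    have hsing : PySem.List.pyRange (m : Int) ((m + 1 : Nat) : Int) 1 = [(m : Int)] := by
      rw [PySem.List.pyRange_one_cons (by push_cast; omega),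
          PySem.List.pyRange_one_eq_nil (by push_cast; omega)]
    rw [hsplit, hsing, ih, List.range_succ, List.map_append]
    simp

-- set(l) is a sublist of l (first occurrences kept in order)
theorem ofList_sublist (l : List Char) : (PySem.Set.ofList l).Sublist l := by
  suffices h : ∀ (l acc : List Char), ∃ t, l.foldl PySem.Set.add acc = acc ++ t ∧ t.Sublist l by
    rcases h l [] with ⟨t, ht, hs⟩
    rw [PySem.Set.ofList_eq_foldl, ht]
    simpa using hs
  intro l
  induction l with
  | nil => intro acc; exact ⟨[], by simp⟩
  | cons x xs ih =>
    intro acc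
    simp only [List.foldl_cons]
    by_cases hc : x ∈ acc
    · rcases ih acc with ⟨t, ht, hs⟩
      refine ⟨t, ?_, hs.cons x⟩
      rwa [show PySem.Set.add acc x = acc by simp [PySem.Set.add, PySem.Set.contains, hc]]
    · rcases ih (acc ++ [x]) with ⟨t, ht, hs⟩
      refine ⟨x :: t, ?_, hs.cons₂ x⟩
      rw [show PySem.Set.add acc x = acc ++ [x] by simp [PySem.Set.add, PySem.Set.contains, hc]]
      simpa using ht
-- len(set(l)) == len(l) says exactly that l has no duplicates
theorem ofList_length_eq_iff (l : List Char) :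
    (PySem.Set.ofList l).length = l.length ↔ l.Nodup := by
  constructor
  · intro h
    have := (ofList_sublist l).eq_of_length h
    rw [← this]
    exact PySem.Set.nodup_ofList l
  · intro h
    rw [PySem.Set.ofList_eq_self_of_nodup l h]

-- the position list is 0,1,…,len-1 exactly when l is a duplicate-free prefix of s
theorem map_find_eq_range_iff (s l : List Char) :
    (l.map (fun c => PySem.Chars.find s [c]) = PySem.List.pyRange 0 (l.length : Int) 1) ↔
      (l <+: s ∧ l.Nodup) := by
  rw [pyRange_zero_natCast]
  have hstep : (l.map (fun c => PySem.Chars.find s [c]) = (List.range l.length).map (fun i => Int.ofNat i)) ↔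
      ∀ i (h : i < l.length), PySem.Chars.find s [l[i]] = (i : Int) := by
    constructor
    · intro h i hi
      have h' := congrArg (fun xs => xs[i]?) h
      simp only [List.getElem?_map, List.getElem?_eq_getElem hi, List.getElem?_range hi,
        Option.map_some, Option.some.injEq] at h'
      exact_mod_cast h'
    · intro h
      apply List.ext_getElem (by simp)
      intro i h1 h2
      rw [List.getElem_map, List.getElem_map, List.getElem_range]
      exact_mod_cast h i (by simpa using h1)
  rw [hstep]
  constructor
  · intro h
    constructor
    · rw [List.prefix_iff_getElem?]
      intro i hi
      exact ((find_single_eq_natCast_iff s l[i] i).mp (h i hi)).1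
    · rw [List.nodup_iff_injective_getElem]
      rintro ⟨i, hi⟩ ⟨j, hj⟩ hij
      have hij' : l[i] = l[j] := hij
      have h1 := h i hi
      have h2 := h j hj
      rw [hij'] at h1
      have hint : (i : Int) = (j : Int) := by rw [← h1, ← h2]
      exact Fin.ext (by exact_mod_cast hint)
  · rintro ⟨hp, hn⟩ i hi
    rw [find_single_eq_natCast_iff]
    have hpg := List.prefix_iff_getElem?.mp hp
    refine ⟨hpg i hi, ?_⟩
    intro j hj hcon
    have hjl : j < l.length := by omega
    rw [hpg j hjl] at hcon
    have : l[j] = l[i] := by simpa using hcon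
    have hne : l[j] ≠ l[i] := by
      intro he
      have := (hn.getElem_inj_iff (hi := hjl) (hj := hi)).mp he
      omega
    exact hne this

-- loop invariant, nonempty stack: A succeeds iff the remaining positions continue
-- consecutively from the position of the stack's top element
theorem loop_cons_eq (s : List Char) :
    ∀ (l : List Char) (t : Char) (stack : List Char),
      check_skill_loop s (t :: stack) l =
        decide (l.map (fun c => PySem.Chars.find s [c]) =
          PySem.List.pyRange (PySem.Chars.find s [t] + 1)
            (PySem.Chars.find s [t] + 1 + l.length) 1) := by
  intro l
  induction l with
  | nil =>
    intro t stack
    simp [check_skill_loop, PySem.List.pyRange_one_eq_nil]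
  | cons x xs ih =>
    intro t stack
    rw [check_skill_loop]
    have hcons : PySem.List.pyRange (PySem.Chars.find s [t] + 1)
        (PySem.Chars.find s [t] + 1 + (x :: xs).length) 1 =
        (PySem.Chars.find s [t] + 1) ::
          PySem.List.pyRange (PySem.Chars.find s [t] + 1 + 1)
            (PySem.Chars.find s [t] + 1 + (x :: xs).length) 1 := by
      apply PySem.List.pyRange_one_cons
      simp
    rw [hcons]
    by_cases h : PySem.Chars.find s [x] = PySem.Chars.find s [t] + 1
    · simp only [h, ih x (t :: stack), List.map_cons, if_true]
      have hup : PySem.Chars.find s [t] + 1 + 1 + (xs.length : Int) =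
          PySem.Chars.find s [t] + 1 + ((x :: xs).length : Int) := by
        simp; omega
      rw [hup]
      simp
    · rw [if_neg h]
      simp [h]

-- skill.index(x) == 0 exactly when x is skill's first character
theorem find_single_eq_zero_iff (s : List Char) (x : Char) :
    PySem.Chars.find s [x] = 0 ↔ s[0]? = some x := by
  have := find_single_eq_natCast_iff s x 0
  simpa using this

-- s[0] read through pyGet? computes List.getElem?
theorem pyGet?_zero (s : List Char) : PySem.List.pyGet? s 0 = s[0]? := by
  cases s <;> simp [PySem.List.pyGet?, PySem.List.pyIdx?]

-- start of the loop (empty stack): A succeeds iff the positions are 0,1,2,…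
theorem loop_nil_eq (s : List Char) (l : List Char) :
    check_skill_loop s [] l =
      decide (l.map (fun c => PySem.Chars.find s [c]) =
        PySem.List.pyRange 0 (l.length : Int) 1) := by
  cases l with
  | nil => simp [check_skill_loop, PySem.List.pyRange_one_eq_nil]
  | cons x xs =>
    rw [check_skill_loop]
    have hcons : PySem.List.pyRange 0 ((x :: xs).length : Int) 1 =
        0 :: PySem.List.pyRange 1 ((x :: xs).length : Int) 1 := by
      apply PySem.List.pyRange_one_cons; simp
    rw [hcons]
    by_cases h : PySem.List.pyGet? s 0 = some x
    · have hx0 : PySem.Chars.find s [x] = 0 := by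
        rw [find_single_eq_zero_iff]
        simpa [pyGet?_zero] using h
      rw [if_pos h, loop_cons_eq s xs x [], hx0]
      have hup : (0 : Int) + 1 + (xs.length : Int) = ((x :: xs).length : Int) := by
        simp only [List.length_cons]; push_cast; omega
      rw [hup]
      simp [hx0]
    · rw [if_neg h]
      have hx0 : PySem.Chars.find s [x] ≠ 0 := by
        rw [Ne, find_single_eq_zero_iff]
        simpa [pyGet?_zero] using h
      simp [hx0]

-- ===== VERDICT (by name: the statement is the Claim_ definition above) =====
theorem check_skill_spec : Claim_equal_check_skill := by
  intro skill skill_tree _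
  unfold Spec_check_skill check_skill check_skill_alt
  rw [loop_nil_eq]
  set l := skill_tree.toList.filter (fun x => PySem.Chars.isIn [x] skill.toList) with hl
  rw [Bool.eq_iff_iff]
  simp only [decide_eq_true_eq, Bool.and_eq_true, beq_iff_eq, PySem.Chars.startswith_iff,
    PySem.Set.len, map_find_eq_range_iff]
  constructor
  · rintro ⟨hp, hn⟩
    exact ⟨by rw [(ofList_length_eq_iff l).mpr hn], hp⟩
  · rintro ⟨hlen, hp⟩
    exact ⟨hp, (ofList_length_eq_iff l).mp (by exact_mod_cast hlen)⟩
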